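-- pv_equiv track=rewrite | github.com/goldflower/codility | Dominator.py | solution
-- ===== SOURCE A (Python) =====
-- def solution(A):
--     # write your code in Python 3.6
--     threshold = len(A) // 2
--     d = {}
--     for index, i in enumerate(A):
--         d[i] = d.get(i, 0) + 1
--         if d[i] > threshold:
--             return index
--     return -1
-- ===== SOURCE B (Python) =====
-- def solution(A):
--     threshold = len(A) // 2
--     counts = {}
--     for x in A:
--         counts[x] = counts.get(x, 0) + 1
--     for v, c in counts.items():
--         if c > threshold:
--             seen = 0
--             for i, x in enumerate(A):
--                 if x == v:
--                     seen += 1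
--                     if seen == threshold + 1:
--                         return i
--     return -1
-- ===== Notes on version B (the rewrite author's own statement) =====
-- stated objective: alternative
-- what changed: Replaces A's single streaming pass (dict of running counts with early return on the first count exceeding the threshold) by a two-pass count-then-locate structure: one pass builds the full count table and picks the dominator, a second pass returns the index of its (threshold+1)-th occurrence.
import Mathlib
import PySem

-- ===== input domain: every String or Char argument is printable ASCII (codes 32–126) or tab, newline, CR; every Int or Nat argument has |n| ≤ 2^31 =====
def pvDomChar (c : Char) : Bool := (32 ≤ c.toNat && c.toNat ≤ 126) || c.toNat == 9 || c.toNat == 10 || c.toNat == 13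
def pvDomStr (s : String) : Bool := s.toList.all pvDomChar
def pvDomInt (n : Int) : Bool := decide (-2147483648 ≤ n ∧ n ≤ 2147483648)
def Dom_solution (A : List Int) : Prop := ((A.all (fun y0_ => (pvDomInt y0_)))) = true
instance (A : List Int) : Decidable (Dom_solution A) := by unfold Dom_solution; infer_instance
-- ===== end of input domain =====

-- B replaces A's one-pass running-count early return by a count-then-locate two-pass
-- structure (build the full count table, pick the dominator, find its (threshold+1)-th
-- occurrence); same O(n) cost, objective: alternative.

-- ===== PORT A =====
-- the for-loop over enumerate(A), carrying d and the running index
def solutionLoop (t : Int) (d : PySem.Dict Int Int) (index : Int) : List Int → Int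
  | [] => -1
  | i :: rest =>
    let d' := d.insert i (d.getD i 0 + 1)
    if d'.getD i 0 > t then index else solutionLoop t d' (index + 1) rest

def solution (A : List Int) : Int :=
  solutionLoop (PySem.Int.floordiv (A.length : Int) 2) PySem.Dict.empty 0 A

-- ===== PORT B =====
-- the inner 'for i, x in enumerate(A)' loop of Source B, carrying seen and the index
def findNth (v t : Int) (seen idx : Int) : List Int → Option Int
  | [] => none
  | x :: rest =>
    if x = v then
      let seen' := seen + 1
      if seen' = t + 1 then some idx else findNth v t seen' (idx + 1) rest
    else findNth v t seen (idx + 1) rest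

-- the outer 'for v, c in counts.items()' loop of Source B
def bItems (t : Int) (A : List Int) : List (Int × Int) → Int
  | [] => -1
  | (v, c) :: rest =>
    if c > t then
      match findNth v t 0 0 A with
      | some i => i
      | none => bItems t A rest
    else bItems t A rest

def solution_alt (A : List Int) : Int :=
  let t := PySem.Int.floordiv (A.length : Int) 2
  let counts := A.foldl (fun d x => d.insert x (d.getD x 0 + 1)) PySem.Dict.empty
  bItems t A counts.items

-- ===== PRECONDITION & SPEC =====
def Spec_solution (A : List Int) (out : Int) : Prop := out = solution_alt A
instance (A : List Int) (out : Int) : Decidable (Spec_solution A out) := by unfold Spec_solution; infer_instance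

-- ===== CLAIM (what is proved, stated in full; the proofs are below) =====
def Claim_equal_solution : Prop := ∀ (A : List Int), Dom_solution A → Spec_solution A (solution A)

-- ===== LEMMAS AND PROOFS =====

lemma two_count_le_length (v w : Int) (hvw : v ≠ w) :
    ∀ A : List Int, A.count v + A.count w ≤ A.length := by
  intro A
  induction A with
  | nil => simp
  | cons a A ih =>
    simp only [List.count_cons, List.length_cons]
    by_cases hv : a = v <;> by_cases hw : a = w <;> simp_all <;> omega

lemma findNth_none_iff (v t : Int) :
    ∀ (rest : List Int) (s idx : Int), s ≤ t →
      (findNth v t s idx rest = none ↔ s + (rest.count v : Int) ≤ t) := by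
  intro rest
  induction rest with
  | nil => intro s idx h; simpa [findNth] using h
  | cons x r ih =>
    intro s idx hs
    by_cases hx : x = v
    · subst hx
      by_cases hdone : s + 1 = t + 1
      · simp [findNth, hdone, List.count_cons]
        omega
      · rw [show findNth x t s idx (x :: r) = findNth x t (s + 1) (idx + 1) r from by
          simp [findNth, hdone]]
        rw [ih (s + 1) (idx + 1) (by omega)]
        simp [List.count_cons]
        omega
    · have hvx : ¬ v = x := fun h => hx h.symm
      rw [show findNth v t s idx (x :: r) = findNth v t s (idx + 1) r from by
        simp [findNth, hx]]
      rw [ih s (idx + 1) hs]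
      simp [List.count_cons, hx, hvx]

-- A's streaming loop agrees with B's locate loop for the (only possible) dominator v
lemma keyA (t v : Int) :
    ∀ (rest p : List Int) (d : PySem.Dict Int Int) (idx : Int),
      (∀ x, d.getD x 0 = (p.count x : Int)) →
      (∀ w, w ≠ v → (p.count w : Int) + (rest.count w : Int) ≤ t) →
      (p.count v : Int) ≤ t →
      solutionLoop t d idx rest = (findNth v t (p.count v) idx rest).getD (-1) := by
  intro rest
  induction rest with
  | nil => intro p d idx _ _ _; simp [solutionLoop, findNth]
  | cons x r ih =>
    intro p d idx hd h2 h3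
    have hgx : (d.insert x (d.getD x 0 + 1)).getD x 0 = (p.count x : Int) + 1 := by
      rw [PySem.Dict.getD_insert]; simp [hd]
    have hinv : ∀ y, (d.insert x (d.getD x 0 + 1)).getD y 0 = ((x :: p).count y : Int) := by
      intro y
      rw [PySem.Dict.getD_insert]
      by_cases hy : y = x
      · subst hy; simp [List.count_cons, hd]
      · rw [if_neg hy, hd y]
        have hxy : ¬ x = y := fun h => hy h.symm
        simp [List.count_cons, hy, hxy]
    have hstep : solutionLoop t d idx (x :: r) =
        if (p.count x : Int) + 1 > t then idx
        else solutionLoop t (d.insert x (d.getD x 0 + 1)) (idx + 1) r := by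
      simp only [solutionLoop, hgx]
    have h2' : ∀ w, w ≠ v → ((x :: p).count w : Int) + (r.count w : Int) ≤ t := by
      intro w hw
      have := h2 w hw
      simp [List.count_cons] at this ⊢
      split_ifs at this ⊢ <;> push_cast at this ⊢ <;> omega
    by_cases hx : x = v
    · subst hx
      by_cases hc : (p.count x : Int) + 1 = t + 1
      · rw [hstep, if_pos (by omega)]
        simp [findNth, hc]
      · rw [hstep, if_neg (by omega)]
        rw [show findNth x t (p.count x : Int) idx (x :: r) =
            findNth x t ((p.count x : Int) + 1) (idx + 1) r from by
          simp [findNth, hc]]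
        have := ih (x :: p) _ (idx + 1) hinv h2' (by
          simp [List.count_cons]; push_cast; omega)
        rw [this]
        congr 2
        simp [List.count_cons]
    · have hvx : ¬ v = x := fun h => hx h.symm
      have hxa : (p.count x : Int) + 1 ≤ t := by
        have := h2 x hx
        simp [List.count_cons] at this
        push_cast at this ⊢; omega
      rw [hstep, if_neg (by omega)]
      rw [show findNth v t (p.count v : Int) idx (x :: r) =
          findNth v t (p.count v : Int) (idx + 1) r from by
        simp [findNth, hx]]
      have := ih (x :: p) _ (idx + 1) hinv h2' (by
        simp [List.count_cons, hx, hvx]; omega)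
      rw [this]
      congr 2
      simp [List.count_cons, hx, hvx]

lemma bItems_all_small (t : Int) (A : List Int) :
    ∀ ks : List Int, (∀ k ∈ ks, (A.count k : Int) ≤ t) →
      bItems t A (ks.map fun k => (k, (A.count k : Int))) = -1 := by
  intro ks
  induction ks with
  | nil => intro _; simp [bItems]
  | cons k ks ih =>
    intro h
    simp only [List.map_cons, bItems]
    rw [if_neg (by have := h k (by simp); omega)]
    exact ih (fun k' hk' => h k' (by simp [hk']))

lemma bItems_reach (t : Int) (A : List Int) (v : Int) (i : Int)
    (hfind : findNth v t 0 0 A = some i) (hbig : t < (A.count v : Int)) :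
    ∀ ks : List Int, (∀ k ∈ ks, k ≠ v → (A.count k : Int) ≤ t) → v ∈ ks →
      bItems t A (ks.map fun k => (k, (A.count k : Int))) = i := by
  intro ks
  induction ks with
  | nil => intro _ hmem; simp at hmem
  | cons k ks ih =>
    intro h hmem
    simp only [List.map_cons, bItems]
    by_cases hk : k = v
    · subst hk
      rw [if_pos hbig, hfind]
    · rw [if_neg (by have := h k (by simp) hk; omega)]
      exact ih (fun k' hk' => h k' (by simp [hk'])) (by
        rcases List.mem_cons.mp hmem with h' | h'
        · exact absurd h'.symm hk
        · exact h')

-- ===== VERDICT (by name: the statement is the Claim_ definition above) =====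
theorem solution_spec : Claim_equal_solution := by
  intro A _
  unfold Spec_solution solution
  simp only [solution_alt, PySem.Dict.foldl_insert_getD_add_one_eq_counter,
    PySem.Dict.items_counter]
  set t := PySem.Int.floordiv (A.length : Int) 2 with ht
  have htv : t = (A.length : Int) / 2 := by
    rw [ht, PySem.Int.floordiv_eq_ediv_of_pos (by omega)]
  have ht0 : 0 ≤ t := by rw [htv]; omega
  by_cases hdom : ∃ v ∈ A, t < (A.count v : Int)
  · obtain ⟨v, hv, hcv⟩ := hdom
    have huniq : ∀ w, w ≠ v → (A.count w : Int) ≤ t := by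
      intro w hw
      have h2 := two_count_le_length v w (fun h => hw h.symm) A
      have hb : (A.length : Int) ≤ 2 * t + 1 := by rw [htv]; omega
      push_cast at *; omega
    have hA := keyA t v A [] PySem.Dict.empty 0
      (fun x => by simp [PySem.Dict.getD_empty])
      (fun w hw => by simpa using huniq w hw)
      (by simpa using ht0)
    have hsome : findNth v t 0 0 A ≠ none := by
      intro h
      have := (findNth_none_iff v t A 0 0 ht0).mp h
      omega
    obtain ⟨i, hi⟩ := Option.ne_none_iff_exists'.mp hsome
    rw [hA]
    simp only [List.count_nil, Nat.cast_zero, hi, Option.getD_some]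
    exact (bItems_reach t A v i hi hcv (PySem.Set.ofList A)
      (fun k _ hk => huniq k hk) ((PySem.Set.mem_ofList A v).mpr hv)).symm
  · push Not at hdom
    have hall : ∀ k, (A.count k : Int) ≤ t := by
      intro k
      by_cases hk : k ∈ A
      · exact hdom k hk
      · simp [List.count_eq_zero_of_not_mem hk]; omega
    have hA := keyA t 0 A [] PySem.Dict.empty 0
      (fun x => by simp [PySem.Dict.getD_empty])
      (fun w _ => by simpa using hall w)
      (by simpa using ht0)
    rw [hA]
    have hnone : findNth 0 t 0 0 A = none := by
      rw [findNth_none_iff 0 t A 0 0 ht0]; have := hall 0; omega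
    simp only [List.count_nil, Nat.cast_zero, hnone, Option.getD_none]
    exact (bItems_all_small t A (PySem.Set.ofList A) (fun k _ => hall k)).symm
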